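-- pv_equiv track=rewrite | github.com/Irshadislander/agent-sentinel | scripts/generate_canonical_report.py | _ordered_baselines
-- ===== SOURCE A (Python) =====
-- from typing import Any
--
-- BASELINE_ORDER = ["no_policy", "no_trace", "raw_errors", "no_plugin_isolation", "default"]
--
-- def _ordered_baselines(rows: list[dict[str, Any]]) -> list[str]:
--     discovered: set[str] = set()
--     for row in rows:
--         baseline = row.get("baseline")
--         if isinstance(baseline, str) and baseline:
--             discovered.add(baseline)
--
--     if not discovered:
--         return ["placeholder"]
--
--     ordered = [baseline for baseline in BASELINE_ORDER if baseline in discovered]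
--     ordered.extend(sorted(discovered.difference(BASELINE_ORDER)))
--     return ordered
-- ===== SOURCE B (Python) =====
-- from typing import Any
--
-- BASELINE_ORDER = ["no_policy", "no_trace", "raw_errors", "no_plugin_isolation", "default"]
--
-- def _ordered_baselines(rows: list[dict[str, Any]]) -> list[str]:
--     names = [b for row in rows if isinstance(b := row.get("baseline"), str) and b]
--     if not names:
--         return ["placeholder"]
--     index = {name: i for i, name in enumerate(BASELINE_ORDER)}
--     return sorted(set(names), key=lambda b: (index.get(b, len(BASELINE_ORDER)), b))
-- ===== Notes on version B (the rewrite author's own statement) =====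
-- stated objective: simpler
-- what changed: Replaces A's incremental set-building loop plus two-phase ordering (filter BASELINE_ORDER by membership, then append the sorted set-difference) with a comprehension collecting the valid names followed by one keyed sort of set(names) using a priority-index map and key (index.get(b, len(BASELINE_ORDER)), b).
import Mathlib
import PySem

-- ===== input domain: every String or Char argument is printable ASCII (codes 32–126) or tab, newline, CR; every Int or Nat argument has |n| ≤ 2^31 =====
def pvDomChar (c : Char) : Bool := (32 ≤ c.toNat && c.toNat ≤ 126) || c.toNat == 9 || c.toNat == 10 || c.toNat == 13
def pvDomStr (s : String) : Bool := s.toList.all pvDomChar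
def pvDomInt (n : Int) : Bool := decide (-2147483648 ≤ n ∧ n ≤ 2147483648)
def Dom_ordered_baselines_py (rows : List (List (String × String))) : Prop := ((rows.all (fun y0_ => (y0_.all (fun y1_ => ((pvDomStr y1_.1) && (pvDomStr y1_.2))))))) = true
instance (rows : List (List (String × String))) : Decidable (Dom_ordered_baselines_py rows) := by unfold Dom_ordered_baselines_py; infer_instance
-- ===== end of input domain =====

-- B replaces A's incremental set-building loop and two-phase ordering (filter
-- BASELINE_ORDER by membership, then append the sorted set-difference) with a
-- comprehension collecting the valid names followed by ONE keyed sort of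
-- set(names) under the key (priority index with default len(BASELINE_ORDER), name).

-- ===== PORT A =====
def pvBaselineOrder : List String :=
  ["no_policy", "no_trace", "raw_errors", "no_plugin_isolation", "default"]

def ordered_baselines_py (rows : List (List (String × String))) : List String :=
  let discovered : PySem.Set String :=
    rows.foldl (fun disc row =>
      match PySem.Dict.get? (PySem.Dict.mk row) "baseline" with
      | some s => if s ≠ "" then PySem.Set.add disc s else disc
      | none => disc) PySem.Set.empty
  if discovered.isEmpty then ["placeholder"]
  else
    (pvBaselineOrder.filter (fun b => PySem.Set.contains discovered b)) ++
      PySem.List.sorted (PySem.Set.diff discovered pvBaselineOrder) (fun x => x) false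

-- ===== PORT B =====
def ordered_baselines_py_alt (rows : List (List (String × String))) : List String :=
  let names : List String :=
    rows.filterMap (fun row =>
      match PySem.Dict.get? (PySem.Dict.mk row) "baseline" with
      | some b => if b ≠ "" then some b else none
      | none => none)
  if names.isEmpty then ["placeholder"]
  else
    let index : PySem.Dict String Int :=
      (PySem.List.enumerate pvBaselineOrder).foldl
        (fun d p => PySem.Dict.insert d p.2 p.1) PySem.Dict.empty
    PySem.List.sorted2 (PySem.Set.ofList names)
      (fun b => PySem.Dict.getD index b (pvBaselineOrder.length : Int))
      (fun b => b) false

-- ===== PRECONDITION & SPEC =====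
def Spec_ordered_baselines_py (rows : List (List (String × String))) (out : List String) : Prop := out = ordered_baselines_py_alt rows
instance (rows : List (List (String × String))) (out : List String) : Decidable (Spec_ordered_baselines_py rows out) := by unfold Spec_ordered_baselines_py; infer_instance

-- ===== CLAIM (what is proved, stated in full; the proofs are below) =====
def Claim_equal_ordered_baselines_py : Prop := ∀ (rows : List (List (String × String))), Dom_ordered_baselines_py rows → Spec_ordered_baselines_py rows (ordered_baselines_py rows)

-- ===== LEMMAS AND PROOFS =====

-- B's priority index, as a name.
def pvIndex : PySem.Dict String Int :=
  (PySem.List.enumerate pvBaselineOrder).foldl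
    (fun d p => PySem.Dict.insert d p.2 p.1) PySem.Dict.empty

-- B's tuple key, read through the lexicographic order on Int × String.
def pvKey (b : String) : Lex (Int × String) :=
  toLex (PySem.Dict.getD pvIndex b (pvBaselineOrder.length : Int), b)

theorem pvIndex_eval : pvIndex = PySem.Dict.mk
    [("no_policy", 0), ("no_trace", 1), ("raw_errors", 2),
     ("no_plugin_isolation", 3), ("default", 4)] := by decide

theorem pvKey1_of_not_mem {b : String} (hb : b ∉ pvBaselineOrder) :
    PySem.Dict.getD pvIndex b (pvBaselineOrder.length : Int) = 5 := by
  simp only [pvBaselineOrder, List.mem_cons, List.not_mem_nil, or_false, not_or] at hb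
  obtain ⟨h1, h2, h3, h4, h5⟩ := hb
  rw [pvIndex_eval]
  simp [PySem.Dict.getD, beq_iff_eq, PySem.Dict.get?,
    Ne.symm h1, Ne.symm h2, Ne.symm h3, Ne.symm h4, Ne.symm h5, pvBaselineOrder]

theorem pvKey1_lt_of_mem {b : String} (hb : b ∈ pvBaselineOrder) :
    PySem.Dict.getD pvIndex b (pvBaselineOrder.length : Int) < 5 := by
  simp only [pvBaselineOrder, List.mem_cons, List.not_mem_nil, or_false] at hb
  rcases hb with rfl | rfl | rfl | rfl | rfl <;> decide

-- B's boolean tuple-key comparison is the strict lexicographic order under pvKey.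
theorem pvBefore_eq : (fun x y : String =>
      decide (PySem.Dict.getD pvIndex x (pvBaselineOrder.length : Int) <
              PySem.Dict.getD pvIndex y (pvBaselineOrder.length : Int)) ||
        (!decide (PySem.Dict.getD pvIndex y (pvBaselineOrder.length : Int) <
                  PySem.Dict.getD pvIndex x (pvBaselineOrder.length : Int)) &&
          decide (x < y)))
    = (fun x y : String => decide (pvKey x < pvKey y)) := by
  funext x y
  rcases lt_trichotomy (PySem.Dict.getD pvIndex x (pvBaselineOrder.length : Int))
      (PySem.Dict.getD pvIndex y (pvBaselineOrder.length : Int)) with h | h | h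
  · simp [pvKey, Prod.Lex.lt_iff, h, ne_of_lt h, not_lt_of_gt h]
  · simp [pvKey, Prod.Lex.lt_iff, h]
  · simp [pvKey, Prod.Lex.lt_iff, ne_of_gt h, not_lt_of_gt h]
    exact fun hle => absurd h (not_lt.mpr hle)

-- sorted2 with B's key pair is the one-key sort under the lexicographic order.
theorem pvSorted2_eq (xs : List String) :
    PySem.List.sorted2 xs
      (fun b => PySem.Dict.getD pvIndex b (pvBaselineOrder.length : Int))
      (fun b => b) false
    = PySem.List.sorted xs pvKey false := by
  rw [PySem.List.sorted_eq_foldl_insertBy]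
  show List.foldl (fun acc x => PySem.List.insertBy (fun x y : String =>
      decide (PySem.Dict.getD pvIndex x (pvBaselineOrder.length : Int) <
              PySem.Dict.getD pvIndex y (pvBaselineOrder.length : Int)) ||
        (!decide (PySem.Dict.getD pvIndex y (pvBaselineOrder.length : Int) <
                  PySem.Dict.getD pvIndex x (pvBaselineOrder.length : Int)) &&
          decide (x < y))) x acc) [] xs = _
  rw [pvBefore_eq]

-- A's incremental set-building fold equals folding Set.add over B's filterMap list.
theorem pvFold_eq (rows : List (List (String × String))) (s : PySem.Set String) :
    rows.foldl (fun disc row =>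
      match PySem.Dict.get? (PySem.Dict.mk row) "baseline" with
      | some v => if v ≠ "" then PySem.Set.add disc v else disc
      | none => disc) s
    = (rows.filterMap (fun row =>
        match PySem.Dict.get? (PySem.Dict.mk row) "baseline" with
        | some b => if b ≠ "" then some b else none
        | none => none)).foldl PySem.Set.add s := by
  induction rows generalizing s with
  | nil => rfl
  | cons r t ih =>
    simp only [List.foldl_cons, List.filterMap_cons]
    cases h : PySem.Dict.get? (PySem.Dict.mk r) "baseline" with
    | none => exact ih s
    | some v =>
      by_cases hv : v = ""
      · simp only [hv]; simpa using ih s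
      · simpa [hv] using ih (PySem.Set.add s v)

-- folding Set.add over a nonempty accumulator never yields the empty list
theorem pvFoldAdd_ne_nil (l : List String) (s : PySem.Set String) (hs : s ≠ []) :
    l.foldl PySem.Set.add s ≠ [] := by
  induction l generalizing s with
  | nil => exact hs
  | cons x t ih =>
    simp only [List.foldl_cons]
    apply ih
    unfold PySem.Set.add
    split
    · exact hs
    · simp

-- A's output on a duplicate-free discovered set equals the keyed sort of that set.
theorem pvMain (disc : PySem.Set String) (hnd : disc.Nodup) :
    (pvBaselineOrder.filter (fun b => PySem.Set.contains disc b)) ++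
      PySem.List.sorted (PySem.Set.diff disc pvBaselineOrder) (fun x => x) false
    = PySem.List.sorted disc pvKey false := by
  symm
  apply PySem.List.sorted_eq_of_perm_of_pairwise_lt
  · -- permutation
    refine List.Perm.trans (List.Perm.append ?_ ?_)
      (List.filter_append_perm (fun x => PySem.Set.contains pvBaselineOrder x) disc)
    · refine (List.perm_ext_iff_of_nodup
        (List.Nodup.filter _ (by decide)) (List.Nodup.filter _ hnd)).mpr ?_
      intro x
      simp [List.mem_filter, and_comm]
    · exact (PySem.List.sorted_perm _ _ _)
  · -- pairwise strictly increasing under pvKey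
    rw [List.pairwise_append]
    refine ⟨?_, ?_, ?_⟩
    · exact List.Pairwise.sublist (List.filter_sublist)
        (by decide : pvBaselineOrder.Pairwise (fun a b => pvKey a < pvKey b))
    · have hdn : (PySem.Set.diff disc pvBaselineOrder).Nodup :=
        PySem.Set.nodup_diff _ _ hnd
      have hp : (PySem.List.sorted (PySem.Set.diff disc pvBaselineOrder)
          (fun x => x) false).Pairwise (· < ·) := by
        have h0 := PySem.List.sorted_ofList_pairwise_lt
          (xs := PySem.Set.diff disc pvBaselineOrder)
        rwa [PySem.Set.ofList_eq_self_of_nodup _ hdn] at h0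
      refine List.Pairwise.imp_of_mem ?_ hp
      intro a b ha hb hab
      have ha' : a ∉ pvBaselineOrder := by
        have := (PySem.List.mem_sorted _ _ _ _).mp ha
        simp [PySem.Set.diff, List.mem_filter] at this
        exact this.2
      have hb' : b ∉ pvBaselineOrder := by
        have := (PySem.List.mem_sorted _ _ _ _).mp hb
        simp [PySem.Set.diff, List.mem_filter] at this
        exact this.2
      simp [pvKey, Prod.Lex.lt_iff, pvKey1_of_not_mem ha', pvKey1_of_not_mem hb', hab]
    · intro a ha b hb
      have ha' : a ∈ pvBaselineOrder := (List.mem_filter.mp ha).1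
      have hb' : b ∉ pvBaselineOrder := by
        have := (PySem.List.mem_sorted _ _ _ _).mp hb
        simp [PySem.Set.diff, List.mem_filter] at this
        exact this.2
      simp [pvKey, Prod.Lex.lt_iff, pvKey1_of_not_mem hb']
      exact Or.inl (pvKey1_lt_of_mem ha')

-- ===== VERDICT (by name: the statement is the Claim_ definition above) =====
theorem ordered_baselines_py_spec : Claim_equal_ordered_baselines_py := by
  intro rows _
  unfold Spec_ordered_baselines_py ordered_baselines_py ordered_baselines_py_alt
  simp only [pvFold_eq]
  set names := rows.filterMap (fun row =>
      match PySem.Dict.get? (PySem.Dict.mk row) "baseline" with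
      | some b => if b ≠ "" then some b else none
      | none => none) with hnames
  have hof : List.foldl PySem.Set.add PySem.Set.empty names = PySem.Set.ofList names := rfl
  rw [hof]
  have hemp : (PySem.Set.ofList names).isEmpty = names.isEmpty := by
    cases names with
    | nil => rfl
    | cons x t =>
      have h1 : PySem.Set.ofList (x :: t) ≠ [] := by
        show (x :: t).foldl PySem.Set.add [] ≠ []
        simp only [List.foldl_cons]
        exact pvFoldAdd_ne_nil t (PySem.Set.add [] x) (by simp [PySem.Set.add])
      simp [h1]
  rw [hemp]
  by_cases h : names.isEmpty
  · simp only [h, if_pos]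
  · simp only [h, if_neg, Bool.false_eq_true, not_false_iff]
    show _ = PySem.List.sorted2 (PySem.Set.ofList names)
      (fun b => PySem.Dict.getD pvIndex b (pvBaselineOrder.length : Int))
      (fun b => b) false
    rw [pvSorted2_eq, pvMain (PySem.Set.ofList names) (PySem.Set.nodup_ofList _)]
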